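-- pv_equiv track=rewrite | github.com/NickG123/AdventOfCode2024 | day17/day17.py | compute_a
-- ===== SOURCE A (Python) =====
-- def run_one(A: int) -> int:
--     B = A % 8
--     B ^= 5
--     C = A // 2**B
--     B ^= 6
--     B ^= C
--     return B % 8
--
-- def compute_a(a: int, expected_outputs: list[int]) -> int | None:
--     for a in range(a, a + 8):
--         if run_one(a) == expected_outputs[0]:
--             if len(expected_outputs) == 1:
--                 return a
--             next_a = compute_a(a * 8, expected_outputs[1:])
--             if next_a is not None:
--                 return next_a
--     return None
-- ===== SOURCE B (Python) =====
-- def run_one(A: int) -> int: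
--     B = A % 8
--     B ^= 5
--     C = A // 2**B
--     B ^= 6
--     B ^= C
--     return B % 8
--
-- def compute_a(a: int, expected_outputs: list[int]) -> int | None:
--     # Iterative DFS with an explicit stack; pushes candidates largest-first so
--     # the smallest is popped first, reproducing the recursion's preorder.
--     n = len(expected_outputs)
--     stack = [(cand, 0) for cand in range(a + 7, a - 1, -1)]
--     while stack:
--         cand, depth = stack.pop()
--         if run_one(cand) == expected_outputs[depth]:
--             if depth == n - 1:
--                 return cand
--             stack.extend((cand * 8 + k, depth + 1) for k in range(7, -1, -1))
--     return None
-- ===== Notes on version B (the rewrite author's own statement) =====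
-- stated objective: alternative
-- what changed: Replaced the recursive backtracking search (recursion on the sliced expected-output list with an 8-candidate for loop per level) by an iterative depth-first search over an explicit stack of (candidate, depth) frames, pushing children largest-first so the smallest candidate is popped first.
import Mathlib
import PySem

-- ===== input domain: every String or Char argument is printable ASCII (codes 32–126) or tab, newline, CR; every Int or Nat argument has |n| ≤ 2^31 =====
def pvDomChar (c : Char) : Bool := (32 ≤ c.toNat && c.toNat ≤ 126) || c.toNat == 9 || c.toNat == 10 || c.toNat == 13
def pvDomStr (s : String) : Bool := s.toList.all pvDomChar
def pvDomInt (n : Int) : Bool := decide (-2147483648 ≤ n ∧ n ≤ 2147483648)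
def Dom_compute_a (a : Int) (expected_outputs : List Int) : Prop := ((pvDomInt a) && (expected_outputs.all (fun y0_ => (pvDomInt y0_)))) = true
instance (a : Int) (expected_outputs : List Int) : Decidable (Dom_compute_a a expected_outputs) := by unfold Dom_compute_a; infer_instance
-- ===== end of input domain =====

-- B replaces A's recursive backtracking (recursion on the sliced list, 8-candidate for loop
-- per level) by an iterative DFS over an explicit stack of (candidate, depth) frames; same
-- search order and result, no speed claim.

-- ===== PORT A =====
-- run_one: the exponent B of 2**B satisfies B = (A % 8) ^ 5 ∈ [0,7] (Python % 8 is
-- nonnegative), so (2 : Int) ^ ….toNat is exact here.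
def pvRunOne (A : Int) : Int :=
  let b1 := PySem.Int.mod A 8
  let b2 := PySem.Int.bxor b1 5
  let c  := PySem.Int.floordiv A ((2 : Int) ^ b2.toNat)
  let b3 := PySem.Int.bxor b2 6
  let b4 := PySem.Int.bxor b3 c
  PySem.Int.mod b4 8

-- A's for loop over range(a, a+8) as recursion over the candidate list; expected_outputs[0]
-- on an empty list (IndexError in Python) yields `none` here and is excluded by Pre_.
def pvComputeAGo (cands : List Int) (expected : List Int) : Option Int :=
  match cands with
  | [] => none
  | c :: rest =>
    match h : PySem.List.pyGet? expected 0 with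
    | none => none  -- IndexError in Python; outside Pre_
    | some e0 =>
      if pvRunOne c = e0 then
        if expected.length = 1 then some c
        else
          match pvComputeAGo (PySem.List.pyRange (c * 8) (c * 8 + 8) 1)
                  (PySem.List.slice expected (some 1) none) with
          | some v => some v
          | none => pvComputeAGo rest expected
      else pvComputeAGo rest expected
termination_by (expected.length, cands.length)
decreasing_by
  · have hne : expected ≠ [] := by
      intro he; rw [he] at h; simp [PySem.List.pyGet?_zero] at h
    rw [PySem.List.slice_from_one]
    have : 0 < expected.length := List.length_pos_iff.mpr hne
    left
    simp [List.length_tail]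
    omega
  · right; simp
  · right; simp

def compute_a (a : Int) (expected_outputs : List Int) : Option Int :=
  pvComputeAGo (PySem.List.pyRange a (a + 8) 1) expected_outputs

-- ===== PORT B =====
-- The Python stack has its top at the END of the list; here the top is the HEAD, so the
-- chunk appended by stack.extend appears reversed at the front (pop order is identical).
-- expected_outputs[depth] out of range (IndexError in Python, unreachable from
-- compute_a_alt's initial stack when expected_outputs ≠ []) skips the frame here.
def pvLoopB (n : Nat) (expected : List Int) (stack : List (Int × Nat)) : Option Int :=
  match stack with
  | [] => none
  | (cand, depth) :: rest =>
    match h : PySem.List.pyGet? expected (depth : Int) with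
    | none => pvLoopB n expected rest
    | some e =>
      if pvRunOne cand = e then
        if depth = n - 1 then some cand
        else pvLoopB n expected
          (((PySem.List.pyRange 7 (-1) (-1)).reverse.map
              (fun k => (cand * 8 + k, depth + 1))) ++ rest)
      else pvLoopB n expected rest
termination_by (stack.map (fun f => 9 ^ (expected.length - f.2))).sum
decreasing_by
  · have hp : 0 < 9 ^ (expected.length - depth) := Nat.pow_pos (by norm_num)
    simp only [List.map_cons, List.sum_cons]
    omega
  · have hd : depth < expected.length := by
      have h' := h
      rw [PySem.List.pyGet?_natCast] at h'
      exact (List.getElem?_eq_some_iff.mp h').1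
    have hr : (PySem.List.pyRange 7 (-1) (-1)).reverse = [0, 1, 2, 3, 4, 5, 6, 7] := by decide
    rw [hr]
    have hsplit : expected.length - depth = (expected.length - (depth + 1)) + 1 := by omega
    have hp : 0 < 9 ^ (expected.length - (depth + 1)) := Nat.pow_pos (by norm_num)
    simp only [List.map_cons, List.sum_cons, List.map_append, List.sum_append, List.map_nil,
      List.sum_nil, hsplit, pow_succ]
    omega
  · have hp : 0 < 9 ^ (expected.length - depth) := Nat.pow_pos (by norm_num)
    simp only [List.map_cons, List.sum_cons]
    omega

def compute_a_alt (a : Int) (expected_outputs : List Int) : Option Int :=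
  let n := expected_outputs.length
  pvLoopB n expected_outputs
    ((PySem.List.pyRange (a + 7) (a - 1) (-1)).reverse.map (fun c => (c, 0)))

-- ===== PRECONDITION & SPEC =====
-- Pre_ excludes only the empty expected_outputs list, on which the Python A (and B alike)
-- raises IndexError at expected_outputs[0].
def Pre_compute_a (a : Int) (expected_outputs : List Int) : Prop := expected_outputs ≠ []
instance (a : Int) (expected_outputs : List Int) : Decidable (Pre_compute_a a expected_outputs) := by unfold Pre_compute_a; infer_instance
def pvWitness_compute_a : Int × List Int := (0, [4])

def Spec_compute_a (a : Int) (expected_outputs : List Int) (out : Option Int) : Prop := out = compute_a_alt a expected_outputs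
instance (a : Int) (expected_outputs : List Int) (out : Option Int) : Decidable (Spec_compute_a a expected_outputs out) := by unfold Spec_compute_a; infer_instance

-- ===== CLAIM (what is proved, stated in full; the proofs are below) =====
def Claim_equal_compute_a : Prop := ∀ (a : Int) (expected_outputs : List Int), Dom_compute_a a expected_outputs → Pre_compute_a a expected_outputs → Spec_compute_a a expected_outputs (compute_a a expected_outputs)

-- ===== LEMMAS AND PROOFS =====

theorem pvComputeAGo_nil (expected : List Int) : pvComputeAGo [] expected = none := by
  simp [pvComputeAGo]

theorem pvComputeAGo_empty (cands : List Int) : pvComputeAGo cands [] = none := by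
  cases cands with
  | nil => simp [pvComputeAGo]
  | cons c rest =>
    simp only [pvComputeAGo]
    split
    · rfl
    · rename_i e0 h
      simp [PySem.List.pyGet?_zero] at h

theorem pvComputeAGo_cons (c : Int) (rest expected : List Int) :
    pvComputeAGo (c :: rest) expected =
      match PySem.List.pyGet? expected 0 with
      | none => none
      | some e0 =>
        if pvRunOne c = e0 then
          if expected.length = 1 then some c
          else
            match pvComputeAGo (PySem.List.pyRange (c * 8) (c * 8 + 8) 1)
                    (PySem.List.slice expected (some 1) none) with
            | some v => some v
            | none => pvComputeAGo rest expected
        else pvComputeAGo rest expected := by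
  simp only [pvComputeAGo]
  split <;> rename_i h <;> simp [h]

theorem pvLoopB_nil (n : Nat) (expected : List Int) : pvLoopB n expected [] = none := by
  simp [pvLoopB]

theorem pvLoopB_cons (n : Nat) (expected : List Int) (c : Int) (d : Nat)
    (rest : List (Int × Nat)) :
    pvLoopB n expected ((c, d) :: rest) =
      match PySem.List.pyGet? expected (d : Int) with
      | none => pvLoopB n expected rest
      | some e =>
        if pvRunOne c = e then
          if d = n - 1 then some c
          else pvLoopB n expected
            (((PySem.List.pyRange 7 (-1) (-1)).reverse.map
                (fun k => (c * 8 + k, d + 1))) ++ rest)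
        else pvLoopB n expected rest := by
  simp only [pvLoopB]
  split <;> rename_i h <;> simp [h]

theorem pvRangeEight (x : Int) :
    PySem.List.pyRange x (x + 8) 1 = [x, x+1, x+2, x+3, x+4, x+5, x+6, x+7] := by
  rw [PySem.List.pyRange_one]
  have h8 : (x + 8 - x).toNat = 8 := by omega
  rw [h8]
  norm_num [List.range_succ]

theorem pvBridge (expected : List Int) :
    ∀ (k d : Nat), expected.length - d < k →
    ∀ (cands : List Int) (S : List (Int × Nat)),
      pvLoopB expected.length expected ((cands.map (fun c => (c, d))) ++ S)
        = (pvComputeAGo cands (expected.drop d)).or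
            (pvLoopB expected.length expected S) := by
  intro k
  induction k with
  | zero => intro d hd; omega
  | succ k ih =>
    intro d hd cands S
    induction cands generalizing S with
    | nil =>
      simp only [List.map_nil, List.nil_append, pvComputeAGo_nil, Option.none_or]
    | cons c rest ihc =>
      simp only [List.map_cons, List.cons_append]
      rw [pvLoopB_cons, pvComputeAGo_cons]
      cases hg : PySem.List.pyGet? expected (d : Int) with
      | none =>
        have hge : expected.length ≤ d := by
          have h' := hg; rw [PySem.List.pyGet?_natCast] at h'
          exact List.getElem?_eq_none_iff.mp h'
        have hdrop : expected.drop d = [] := List.drop_eq_nil_iff.mpr hge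
        have hget0 : PySem.List.pyGet? (expected.drop d) 0 = none := by
          rw [hdrop]; simp [PySem.List.pyGet?_zero]
        rw [hget0, ihc S, hdrop, pvComputeAGo_empty, Option.none_or]
      | some e =>
        have hdL : d < expected.length := by
          have h' := hg; rw [PySem.List.pyGet?_natCast] at h'
          exact (List.getElem?_eq_some_iff.mp h').1
        have hget0 : PySem.List.pyGet? (expected.drop d) 0 = some e := by
          rw [PySem.List.pyGet?_zero, List.getElem?_drop]
          have h' := hg; rw [PySem.List.pyGet?_natCast] at h'
          simpa using h'
        rw [hget0]
        by_cases hrun : pvRunOne c = e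
        · simp only [if_pos hrun]
          have hlen : (expected.drop d).length = expected.length - d := List.length_drop
          by_cases hdl : d = expected.length - 1
          · have h1 : (expected.drop d).length = 1 := by rw [hlen]; omega
            simp only [if_pos hdl, if_pos h1, Option.some_or]
          · have h1 : (expected.drop d).length ≠ 1 := by rw [hlen]; omega
            rw [if_neg hdl, if_neg h1]
            have hch : (PySem.List.pyRange 7 (-1) (-1)).reverse.map
                  (fun k => (c * 8 + k, d + 1))
                = (PySem.List.pyRange (c * 8) (c * 8 + 8) 1).map (fun x => (x, d + 1)) := by
              have hr8 : (PySem.List.pyRange 7 (-1) (-1)).reverse = [0,1,2,3,4,5,6,7] := by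
                decide
              rw [hr8, pvRangeEight]
              norm_num
            rw [hch, ih (d + 1) (by omega) (PySem.List.pyRange (c * 8) (c * 8 + 8) 1)
                  ((rest.map (fun c => (c, d))) ++ S), ihc S]
            have hsl : PySem.List.slice (expected.drop d) (some 1) none
                = expected.drop (d + 1) := by
              rw [PySem.List.slice_from_one, List.tail_drop]
            rw [hsl]
            cases pvComputeAGo (PySem.List.pyRange (c * 8) (c * 8 + 8) 1)
                (expected.drop (d + 1)) <;> simp
        · simp only [if_neg hrun]
          exact ihc S

-- ===== VERDICT (by name: the statement is the Claim_ definition above) =====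
theorem compute_a_spec : Claim_equal_compute_a := by
  intro a expected _ _
  show compute_a a expected = compute_a_alt a expected
  unfold compute_a compute_a_alt
  have e1 : a - 1 + 1 = a := by ring
  have e2 : a + 7 + 1 = a + 8 := by ring
  rw [PySem.List.pyRange_neg_one_eq_reverse, e1, e2, List.reverse_reverse]
  have hb := pvBridge expected (expected.length + 1) 0 (by omega)
    (PySem.List.pyRange a (a + 8) 1) []
  simp only [List.append_nil, List.drop_zero, pvLoopB_nil, Option.or_none] at hb
  exact hb.symm
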